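-- pv_equiv track=rewrite | github.com/dahatake/HypervelocityEngineering | hve/mdq/indexer.py | _split_text_segment
-- ===== SOURCE A (Python) =====
-- def _split_text_segment(seg_lines: list[str], max_chars: int) -> list[list[str]]:
--     """Split a 'text' segment into sub-segments under max_chars.
--
--     Splits at blank-line paragraph boundaries first. Paragraphs that are still
--     over the budget are further split line-by-line. As a last resort, a single
--     long line is hard-cut by character count.
--     """
--     if max_chars <= 0:
--         return [seg_lines]
--     # Build paragraphs (list of list-of-lines) separated by blank lines.
--     paragraphs: list[list[str]] = []
--     current: list[str] = []
--     for ln in seg_lines: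
--         if ln.strip() == "":
--             if current:
--                 paragraphs.append(current)
--                 current = []
--             # blank line itself is dropped as separator
--         else:
--             current.append(ln)
--     if current:
--         paragraphs.append(current)
--
--     # Helper: split a single oversized paragraph by lines, hard-cutting any
--     # single line that still exceeds max_chars.
--     def _split_paragraph(par: list[str]) -> list[list[str]]:
--         out: list[list[str]] = []
--         buf: list[str] = []
--         size = 0
--         for ln in par:
--             ln_len = len(ln) + 1
--             if ln_len > max_chars:
--                 # hard cut the single long line
--                 if buf:
--                     out.append(buf)
--                     buf, size = [], 0
--                 for start in range(0, len(ln), max_chars):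
--                     out.append([ln[start:start + max_chars]])
--                 continue
--             if size + ln_len > max_chars and buf:
--                 out.append(buf)
--                 buf, size = [], 0
--             buf.append(ln)
--             size += ln_len
--         if buf:
--             out.append(buf)
--         return out
--
--     # Greedy-pack paragraphs into sub-segments. Oversized paragraphs are
--     # pre-split.
--     expanded: list[list[str]] = []
--     for par in paragraphs:
--         par_len = sum(len(x) + 1 for x in par)
--         if par_len > max_chars:
--             expanded.extend(_split_paragraph(par))
--         else:
--             expanded.append(par)
--
--     sub_segments: list[list[str]] = []
--     buf: list[str] = []
--     size = 0
--     for par in expanded: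
--         par_len = sum(len(x) + 1 for x in par)
--         sep = 1 if buf else 0  # blank line between paragraphs in the same sub
--         if buf and size + sep + par_len > max_chars:
--             sub_segments.append(buf)
--             buf, size = [], 0
--             sep = 0
--         if buf:
--             buf.append("")  # restore blank line as separator
--             size += 1
--         buf.extend(par)
--         size += par_len
--     if buf:
--         sub_segments.append(buf)
--     return sub_segments
-- ===== SOURCE B (Python) =====
-- def _split_text_segment(seg_lines: list[str], max_chars: int) -> list[list[str]]:
--     """Single streaming pass: no intermediate paragraph/expanded lists.
--     Maintains a current chunk buffer (lines of the paragraph piece being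
--     collected) and the current sub-segment buffer; chunks are emitted into
--     the sub-segment buffer on the fly (a blank separator is added between
--     chunks sharing a sub-segment), flushing when the budget would overflow.
--     Over-long lines are hard-cut and each piece emitted as its own chunk."""
--     if max_chars <= 0:
--         return [seg_lines]
--
--     subs: list[list[str]] = []
--     buf: list[str] = []
--     size = 0
--     cur: list[str] = []
--     cur_size = 0
--
--     def emit(chunk: list[str], chunk_size: int) -> None:
--         nonlocal subs, buf, size
--         if buf and size + 1 + chunk_size > max_chars:
--             subs.append(buf)
--             buf = list(chunk)
--             size = chunk_size
--         elif buf: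
--             buf.append("")
--             buf.extend(chunk)
--             size += 1 + chunk_size
--         else:
--             buf = list(chunk)
--             size = chunk_size
--
--     for ln in seg_lines:
--         if ln.strip() == "":
--             if cur:
--                 emit(cur, cur_size)
--                 cur, cur_size = [], 0
--         elif len(ln) + 1 > max_chars:
--             if cur:
--                 emit(cur, cur_size)
--                 cur, cur_size = [], 0
--             rest = ln
--             while rest:
--                 piece, rest = rest[:max_chars], rest[max_chars:]
--                 emit([piece], len(piece) + 1)
--         else:
--             if cur and cur_size + len(ln) + 1 > max_chars:
--                 emit(cur, cur_size)
--                 cur, cur_size = [], 0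
--             cur.append(ln)
--             cur_size += len(ln) + 1
--     if cur:
--         emit(cur, cur_size)
--     if buf:
--         subs.append(buf)
--     return subs
-- ===== Notes on version B (the rewrite author's own statement) =====
-- stated objective: alternative
-- what changed: A runs three staged passes that materialise intermediate lists (group lines into paragraphs, pre-split oversized paragraphs into an 'expanded' chunk list, then greedy-pack that list); B is one fused streaming pass over the lines that materialises no intermediate list: it keeps a current chunk buffer and the current sub-segment buffer and emits each completed chunk (paragraph piece, hard-cut slice) straight into the sub-segment being built, flushing on overflow.
import Mathlib
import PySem

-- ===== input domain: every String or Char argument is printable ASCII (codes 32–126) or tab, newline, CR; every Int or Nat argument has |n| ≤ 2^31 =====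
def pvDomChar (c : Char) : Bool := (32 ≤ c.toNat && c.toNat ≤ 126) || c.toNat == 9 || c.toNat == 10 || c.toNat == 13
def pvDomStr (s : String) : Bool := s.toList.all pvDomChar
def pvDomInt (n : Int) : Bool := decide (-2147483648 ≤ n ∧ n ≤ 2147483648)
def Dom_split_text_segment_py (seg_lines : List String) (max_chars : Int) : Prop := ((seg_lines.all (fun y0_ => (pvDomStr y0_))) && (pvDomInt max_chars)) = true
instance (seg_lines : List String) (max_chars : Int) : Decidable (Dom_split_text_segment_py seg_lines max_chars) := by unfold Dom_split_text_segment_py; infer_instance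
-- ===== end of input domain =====

-- B replaces A's three staged passes (build paragraph lists, pre-split oversized paragraphs
-- into an 'expanded' chunk list, greedy-pack that list) by ONE fused streaming pass over the
-- lines that materialises no intermediate list; alternative decomposition, no speed claim.

-- ===== PORT A =====
-- `sum(len(x) + 1 for x in par)`
def pvSumLenA (par : List String) : Int :=
  (par.map (fun x => PySem.Str.len x + 1)).sum

-- the paragraph-building loop of A (state: paragraphs, current)
def pvParasLoopA : List (List String) × List String → List String → List (List String) × List String
  | st, [] => st
  | (paragraphs, current), ln :: rest =>
    if PySem.Str.strip ln = "" then
      if current ≠ [] then pvParasLoopA (paragraphs ++ [current], []) rest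
      else pvParasLoopA (paragraphs, current) rest
    else pvParasLoopA (paragraphs, current ++ [ln]) rest

def pvParasA (seg_lines : List String) : List (List String) :=
  let st := pvParasLoopA ([], []) seg_lines
  if st.2 ≠ [] then st.1 ++ [st.2] else st.1

-- the loop of `_split_paragraph` (state: out, buf, size)
def pvSplitParLoopA (m : Int) : List (List String) × List String × Int → List String → List (List String) × List String × Int
  | st, [] => st
  | (out, buf, size), ln :: rest =>
    let ln_len := PySem.Str.len ln + 1
    if ln_len > m then
      let out := if buf ≠ [] then out ++ [buf] else out
      let out := (PySem.List.pyRange 0 (PySem.Str.len ln) m).foldl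
        (fun o s => o ++ [[PySem.Str.slice ln (some s) (some (s + m))]]) out
      pvSplitParLoopA m (out, [], 0) rest
    else
      let st' := if size + ln_len > m ∧ buf ≠ [] then (out ++ [buf], ([] : List String), (0 : Int)) else (out, buf, size)
      pvSplitParLoopA m (st'.1, st'.2.1 ++ [ln], st'.2.2 + ln_len) rest

def pvSplitParA (m : Int) (par : List String) : List (List String) :=
  let st := pvSplitParLoopA m ([], [], 0) par
  if st.2.1 ≠ [] then st.1 ++ [st.2.1] else st.1

-- the `expanded` loop of A
def pvExpandedA (m : Int) (paragraphs : List (List String)) : List (List String) :=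
  paragraphs.foldl
    (fun expanded par =>
      if pvSumLenA par > m then expanded ++ pvSplitParA m par else expanded ++ [par]) []

-- the greedy-packing loop of A (state: sub_segments, buf, size)
def pvPackLoopA (m : Int) : List (List String) × List String × Int → List (List String) → List (List String) × List String × Int
  | st, [] => st
  | (subs, buf, size), par :: rest =>
    let par_len := pvSumLenA par
    let sep : Int := if buf ≠ [] then 1 else 0
    let st' := if buf ≠ [] ∧ size + sep + par_len > m then (subs ++ [buf], ([] : List String), (0 : Int)) else (subs, buf, size)
    let bs := if st'.2.1 ≠ [] then (st'.2.1 ++ [""], st'.2.2 + 1) else (st'.2.1, st'.2.2)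
    pvPackLoopA m (st'.1, bs.1 ++ par, bs.2 + par_len) rest

def split_text_segment_py (seg_lines : List String) (max_chars : Int) : List (List String) :=
  if max_chars ≤ 0 then [seg_lines]
  else
    let paragraphs := pvParasA seg_lines
    let expanded := pvExpandedA max_chars paragraphs
    let st := pvPackLoopA max_chars ([], [], 0) expanded
    if st.2.1 ≠ [] then st.1 ++ [st.2.1] else st.1

-- ===== PORT B =====
-- Source B's `emit(chunk, chunk_size)` acting on the pack state (subs, buf, size)
def pvEmitB (m : Int) (chunk : List String) (csz : Int) (st : List (List String) × List String × Int) : List (List String) × List String × Int :=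
  if st.2.1 ≠ [] ∧ st.2.2 + 1 + csz > m then (st.1 ++ [st.2.1], chunk, csz)
  else if st.2.1 ≠ [] then (st.1, st.2.1 ++ [""] ++ chunk, st.2.2 + 1 + csz)
  else (st.1, chunk, csz)

-- Source B's `while rest: piece, rest = rest[:max_chars], rest[max_chars:]; emit([piece], len(piece)+1)`
-- (piece size mp+1 = max_chars exactly: the top-level guard ensures max_chars ≥ 1 at every call)
def pvCutEmitB (m : Int) (mp : Nat) : List Char → (List (List String) × List String × Int) → List (List String) × List String × Int
  | [], st => st
  | c :: cs, st =>
    pvCutEmitB m mp (List.drop (mp + 1) (c :: cs))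
      (pvEmitB m [String.ofList (List.take (mp + 1) (c :: cs))] (((List.take (mp + 1) (c :: cs)).length : Int) + 1) st)
termination_by l => l.length
decreasing_by simp

-- Source B's single line loop; state = (pack state, cur, cur_size)
def pvStreamB (m : Int) : (List (List String) × List String × Int) × List String × Int → List String → (List (List String) × List String × Int) × List String × Int
  | st, [] => st
  | (pk, cur, cursz), ln :: rest =>
    if PySem.Str.strip ln = "" then
      if cur ≠ [] then pvStreamB m (pvEmitB m cur cursz pk, [], 0) rest
      else pvStreamB m (pk, cur, cursz) rest
    else if PySem.Str.len ln + 1 > m then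
      let pk' := if cur ≠ [] then pvEmitB m cur cursz pk else pk
      pvStreamB m (pvCutEmitB m (m.toNat - 1) ln.toList pk', [], 0) rest
    else
      let st' := if cur ≠ [] ∧ cursz + (PySem.Str.len ln + 1) > m then (pvEmitB m cur cursz pk, ([] : List String), (0 : Int)) else (pk, cur, cursz)
      pvStreamB m (st'.1, st'.2.1 ++ [ln], st'.2.2 + (PySem.Str.len ln + 1)) rest

def split_text_segment_py_alt (seg_lines : List String) (max_chars : Int) : List (List String) :=
  if max_chars ≤ 0 then [seg_lines]
  else
    let st := pvStreamB max_chars (([], [], 0), [], 0) seg_lines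
    let pk := if st.2.1 ≠ [] then pvEmitB max_chars st.2.1 st.2.2 st.1 else st.1
    if pk.2.1 ≠ [] then pk.1 ++ [pk.2.1] else pk.1

-- ===== PRECONDITION & SPEC =====
def Spec_split_text_segment_py (seg_lines : List String) (max_chars : Int) (out : List (List String)) : Prop := out = split_text_segment_py_alt seg_lines max_chars
instance (seg_lines : List String) (max_chars : Int) (out : List (List String)) : Decidable (Spec_split_text_segment_py seg_lines max_chars out) := by unfold Spec_split_text_segment_py; infer_instance

-- ===== CLAIM (what is proved, stated in full; the proofs are below) =====
def Claim_equal_split_text_segment_py : Prop := ∀ (seg_lines : List String) (max_chars : Int), Dom_split_text_segment_py seg_lines max_chars → Spec_split_text_segment_py seg_lines max_chars (split_text_segment_py seg_lines max_chars)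

-- ===== LEMMAS AND PROOFS =====

-- proof-level vocabulary: paragraphs, hard cut, maximal fitting prefix, chunk lists
def pvBlankB (ln : String) : Bool := PySem.Str.strip ln == ""

def pvCostB (lines : List String) : Int :=
  (lines.map (fun x => PySem.Str.len x + 1)).sum

def pvParasB : List String → List (List String)
  | [] => []
  | ln :: rest =>
    if pvBlankB ln then pvParasB rest
    else (ln :: rest.takeWhile (fun x => !pvBlankB x)) :: pvParasB (rest.dropWhile (fun x => !pvBlankB x))
termination_by l => l.length
decreasing_by
  · simp
  · have := List.length_dropWhile_le (fun x => !pvBlankB x) rest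
    simp only [List.length_cons]
    omega

def pvHardCutB (mp : Nat) : List Char → List (List String)
  | [] => []
  | c :: cs => [String.ofList (List.take (mp + 1) (c :: cs))] :: pvHardCutB mp (List.drop (mp + 1) (c :: cs))
termination_by l => l.length
decreasing_by simp

def pvTakeFitB (m : Int) (size : Int) : List String → List String × List String
  | [] => ([], [])
  | ln :: rest =>
    if PySem.Str.len ln + 1 ≤ m ∧ size + (PySem.Str.len ln + 1) ≤ m then
      let t := pvTakeFitB m (size + (PySem.Str.len ln + 1)) rest
      (ln :: t.1, t.2)
    else ([], ln :: rest)

theorem pvTakeFitB_snd_length (m : Int) : ∀ (size : Int) (l : List String), (pvTakeFitB m size l).2.length ≤ l.length := by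
  intro size l
  induction l generalizing size with
  | nil => simp [pvTakeFitB]
  | cons ln rest ih =>
    simp only [pvTakeFitB]
    split
    · exact le_trans (ih _) (by simp)
    · simp

def pvChunksB (m : Int) : List String → List (List String)
  | [] => []
  | ln :: rest =>
    if h : PySem.Str.len ln + 1 > m then
      pvHardCutB (m.toNat - 1) ln.toList ++ pvChunksB m rest
    else
      let t := pvTakeFitB m 0 (ln :: rest)
      t.1 :: pvChunksB m t.2
termination_by l => l.length
decreasing_by
  · simp
  · simp only [pvTakeFitB, not_lt.mp h, le_refl, and_self, if_pos, zero_add,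
      (show PySem.Str.len ln + 1 ≤ m ∧ 0 + (PySem.Str.len ln + 1) ≤ m by omega)]
    have := pvTakeFitB_snd_length m (0 + (PySem.Str.len ln + 1)) rest
    simp at this ⊢
    omega

-- chunk list of the whole input: paragraphs flattened to chunks
def pvFlatChunks (m : Int) (ls : List String) : List (List String) :=
  (pvParasB ls).flatMap (pvChunksB m)

-- chunk list still to be produced from partial chunk `cur` and remaining lines
def pvGlueS (m : Int) (cur : List String) (ls : List String) : List (List String) :=
  if cur = [] then pvFlatChunks m ls
  else
    let t := pvTakeFitB m (pvCostB cur) (ls.takeWhile (fun x => !pvBlankB x))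
    (cur ++ t.1) :: (pvChunksB m t.2 ++ pvFlatChunks m (ls.dropWhile (fun x => !pvBlankB x)))

-- folding Source B's emit over a ready-made chunk list
def pvPackFoldB (m : Int) (st : List (List String) × List String × Int) (C : List (List String)) : List (List String) × List String × Int :=
  C.foldl (fun st c => pvEmitB m c (pvCostB c) st) st

-- finalisation `if buf: out.append(buf)` shared by both programs
def pvFin2 (st : List (List String) × List String × Int) : List (List String) :=
  if st.2.1 ≠ [] then st.1 ++ [st.2.1] else st.1

-- finalisation `if current: paragraphs.append(current)` of A's paragraph loop
def pvFinPar (st : List (List String) × List String) : List (List String) :=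
  if st.2 ≠ [] then st.1 ++ [st.2] else st.1

theorem pvSumLenA_eq_costB (par : List String) : pvSumLenA par = pvCostB par := rfl

theorem pvCostB_cons (x : String) (xs : List String) :
    pvCostB (x :: xs) = (PySem.Str.len x + 1) + pvCostB xs := by
  simp [pvCostB]

theorem pvCostB_append (xs ys : List String) :
    pvCostB (xs ++ ys) = pvCostB xs + pvCostB ys := by
  simp [pvCostB]

theorem pvStrLen_nonneg (s : String) : 0 ≤ PySem.Str.len s := by
  rw [PySem.Str.len_eq]; positivity

theorem pvCostB_nonneg (l : List String) : 0 ≤ pvCostB l := by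
  induction l with
  | nil => simp [pvCostB]
  | cons x xs ih =>
    rw [pvCostB_cons]
    have := pvStrLen_nonneg x
    omega

-- ---- paragraphs (A side) ----
theorem pvParasB_blank {ln : String} (h : PySem.Str.strip ln = "") (rest : List String) :
    pvParasB (ln :: rest) = pvParasB rest := by
  rw [pvParasB]
  simp [pvBlankB, h]

theorem pvParasB_nonblank {ln : String} (h : ¬ PySem.Str.strip ln = "") (rest : List String) :
    pvParasB (ln :: rest) =
      (ln :: rest.takeWhile (fun x => !pvBlankB x)) :: pvParasB (rest.dropWhile (fun x => !pvBlankB x)) := by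
  rw [pvParasB]
  simp [pvBlankB, h]

def pvGlue (cur : List String) (ls : List String) : List (List String) :=
  if cur = [] then pvParasB ls
  else (cur ++ ls.takeWhile (fun x => !pvBlankB x)) :: pvParasB (ls.dropWhile (fun x => !pvBlankB x))

theorem pvParasLoopA_eq : ∀ (ls : List String) (acc : List (List String)) (cur : List String),
    pvFinPar (pvParasLoopA (acc, cur) ls) = acc ++ pvGlue cur ls := by
  intro ls
  induction ls with
  | nil =>
    intro acc cur
    by_cases hc : cur = [] <;>
      simp [pvParasLoopA, pvFinPar, pvGlue, pvTakeFitB, hc, pvParasB]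
  | cons ln rest ih =>
    intro acc cur
    by_cases hb : PySem.Str.strip ln = "" <;> by_cases hc : cur = []
    · rw [pvParasLoopA, if_pos hb]
      subst hc
      rw [if_neg (by simp), ih]
      simp [pvGlue, pvParasB_blank hb]
    · rw [pvParasLoopA, if_pos hb, if_pos hc, ih]
      simp [pvGlue, hc, pvBlankB, hb, pvParasB_blank hb]
    · rw [pvParasLoopA, if_neg hb, ih]
      subst hc
      simp [pvGlue, pvParasB_nonblank hb, pvBlankB, hb]
    · rw [pvParasLoopA, if_neg hb, ih]
      simp [pvGlue, hc, pvBlankB, hb]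

theorem pvParasA_eq (ls : List String) : pvParasA ls = pvParasB ls := by
  have h := pvParasLoopA_eq ls [] []
  simpa [pvParasA, pvFinPar, pvGlue] using h

theorem pvParasB_ne_nil : ∀ (ls : List String), ∀ p ∈ pvParasB ls, p ≠ [] := by
  intro ls
  fun_induction pvParasB ls with
  | case1 => simp
  | case2 ln rest hblank ih => simpa [pvParasB, hblank] using ih
  | case3 ln rest hblank ih =>
    intro p hp
    rcases List.mem_cons.mp hp with h | h
    · simp [h]
    · exact ih p h

-- ---- hard cut (A side) ----
theorem pvPyRange_cons {a b s : Int} (hs : 0 < s) (hab : a < b) :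
    PySem.List.pyRange a b s = a :: PySem.List.pyRange (a + s) b s := by
  rw [PySem.List.pyRange_of_pos _ _ hs, PySem.List.pyRange_of_pos _ _ hs]
  have hcount : ((b - a + s - 1) / s).toNat
      = (if a + s < b then ((b - (a + s) + s - 1) / s).toNat else 0) + 1 := by
    by_cases h : a + s < b
    · rw [if_pos h]
      have he : (b - a + s - 1) = (b - (a + s) + s - 1) + 1 * s := by ring
      rw [he, Int.add_mul_ediv_right _ _ (by omega)]
      have h2 : (0:Int) ≤ (b - (a + s) + s - 1) / s := Int.ediv_nonneg (by omega) (by omega)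
      omega
    · rw [if_neg h]
      have he : (b - a + s - 1) = (b - a - 1) + 1 * s := by ring
      rw [he, Int.add_mul_ediv_right _ _ (by omega)]
      have h0 : (b - a - 1) / s = 0 := Int.ediv_eq_zero_of_lt (by omega) (by omega)
      omega
  rw [if_pos hab, hcount, List.range_succ_eq_map]
  simp only [List.map_cons, Nat.cast_zero, mul_zero, add_zero, List.map_map]
  congr 1
  apply List.map_congr_left
  intro x _
  simp only [Function.comp_apply]
  push_cast
  ring

theorem pvHardCut_fold (ln : String) (mp : Nat) :
    ∀ (n k : Nat) (out : List (List String)), ln.toList.length - k ≤ n →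
    (PySem.List.pyRange (k : Int) (PySem.Str.len ln) ((mp : Int) + 1)).foldl
        (fun o s => o ++ [[PySem.Str.slice ln (some s) (some (s + ((mp : Int) + 1)))]]) out
      = out ++ pvHardCutB mp (ln.toList.drop k) := by
  intro n
  induction n with
  | zero =>
    intro k out hn
    have hk : ln.toList.length ≤ k := by omega
    have h1 : ¬ ((k : Int) < PySem.Str.len ln) := by
      rw [PySem.Str.len_eq]; exact_mod_cast not_lt.mpr hk
    rw [PySem.List.pyRange_of_pos _ _ (by omega : (0:Int) < (mp:Int)+1), if_neg h1]
    simp [List.drop_eq_nil_of_le hk, pvHardCutB]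
  | succ n ih =>
    intro k out hn
    by_cases hk : k < ln.toList.length
    · have hlt : (k : Int) < PySem.Str.len ln := by
        rw [PySem.Str.len_eq]; exact_mod_cast hk
      rw [pvPyRange_cons (by omega) hlt, List.foldl_cons]
      have hstep : (k : Int) + ((mp : Int) + 1) = ((k + (mp + 1) : Nat) : Int) := by push_cast; ring
      rw [hstep, ih (k + (mp + 1)) _ (by omega)]
      obtain ⟨c, cs, hD⟩ : ∃ c cs, ln.toList.drop k = c :: cs := by
        cases hE : ln.toList.drop k with
        | nil =>
          exfalso
          have := (List.drop_eq_nil_iff).mp hE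
          omega
        | cons c cs => exact ⟨c, cs, rfl⟩
      rw [hD, pvHardCutB, ← hD, List.drop_drop]
      have hslice : PySem.Str.slice ln (some (k : Int)) (some ((k + (mp + 1) : Nat) : Int))
          = String.ofList (List.take (mp + 1) (ln.toList.drop k)) := by
        symm
        rw [String.ofList_eq, PySem.Str.toList_slice]
        rw [PySem.Chars.slice_eq_listSlice]
        have hc : ((k + (mp + 1) : Nat) : Int) = (k : Int) + ((mp + 1 : Nat) : Int) := by push_cast; ring
        rw [hc, PySem.List.slice_natCast_add]
      rw [hslice]
      simp
    · have h1 : ¬ ((k : Int) < PySem.Str.len ln) := by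
        rw [PySem.Str.len_eq]; exact_mod_cast not_lt.mpr (le_of_not_gt hk)
      rw [PySem.List.pyRange_of_pos _ _ (by omega : (0:Int) < (mp:Int)+1), if_neg h1]
      simp [List.drop_eq_nil_of_le (le_of_not_gt hk), pvHardCutB]

-- ---- take-fit / chunks ----
theorem pvTakeFitB_all (m : Int) : ∀ (l : List String) (size : Int), 0 ≤ size →
    size + pvCostB l ≤ m → pvTakeFitB m size l = (l, []) := by
  intro l
  induction l with
  | nil => intro size _ _; rfl
  | cons ln rest ih =>
    intro size h0 hle
    rw [pvCostB_cons] at hle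
    have hr := pvCostB_nonneg rest
    have hl := pvStrLen_nonneg ln
    rw [pvTakeFitB, if_pos (show PySem.Str.len ln + 1 ≤ m ∧ size + (PySem.Str.len ln + 1) ≤ m by omega)]
    simp only [ih (size + (PySem.Str.len ln + 1)) (by omega) (by omega)]

theorem pvChunksB_nil (m : Int) : pvChunksB m [] = [] := by
  rw [pvChunksB]

theorem pvChunksB_cons_long (m : Int) (ln : String) (rest : List String)
    (h : PySem.Str.len ln + 1 > m) :
    pvChunksB m (ln :: rest) = pvHardCutB (m.toNat - 1) ln.toList ++ pvChunksB m rest := by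
  rw [pvChunksB, dif_pos h]

theorem pvChunksB_cons_fit (m : Int) (ln : String) (rest : List String)
    (h : ¬ PySem.Str.len ln + 1 > m) :
    pvChunksB m (ln :: rest) =
      (pvTakeFitB m 0 (ln :: rest)).1 :: pvChunksB m (pvTakeFitB m 0 (ln :: rest)).2 := by
  rw [pvChunksB, dif_neg h]

theorem pvTakeFitB_cons_pos (m size : Int) (ln : String) (rest : List String)
    (h : PySem.Str.len ln + 1 ≤ m ∧ size + (PySem.Str.len ln + 1) ≤ m) :
    pvTakeFitB m size (ln :: rest) =
      (ln :: (pvTakeFitB m (size + (PySem.Str.len ln + 1)) rest).1,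
        (pvTakeFitB m (size + (PySem.Str.len ln + 1)) rest).2) := by
  rw [pvTakeFitB, if_pos h]

theorem pvTakeFitB_cons_neg (m size : Int) (ln : String) (rest : List String)
    (h : ¬ (PySem.Str.len ln + 1 ≤ m ∧ size + (PySem.Str.len ln + 1) ≤ m)) :
    pvTakeFitB m size (ln :: rest) = ([], ln :: rest) := by
  rw [pvTakeFitB]
  simp only [if_neg h]

theorem pvChunksB_of_fits (m : Int) (par : List String) (hne : par ≠ [])
    (hfit : pvCostB par ≤ m) : pvChunksB m par = [par] := by
  obtain ⟨ln, rest, rfl⟩ := List.exists_cons_of_ne_nil hne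
  have hr := pvCostB_nonneg rest
  have hl := pvStrLen_nonneg ln
  rw [pvCostB_cons] at hfit
  rw [pvChunksB_cons_fit m ln rest (by omega)]
  rw [pvTakeFitB_all m (ln :: rest) 0 le_rfl (by rw [pvCostB_cons]; omega)]
  simp [pvChunksB_nil]

def pvGlue2 (m : Int) (buf : List String) (size : Int) (ls : List String) : List (List String) :=
  if buf = [] then pvChunksB m ls
  else (buf ++ (pvTakeFitB m size ls).1) :: pvChunksB m (pvTakeFitB m size ls).2

theorem pvSplitParLoopA_eq (m : Int) (hm : 0 < m) :
    ∀ (ls : List String) (out : List (List String)) (buf : List String) (size : Int),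
    size = pvCostB buf →
    pvFin2 (pvSplitParLoopA m (out, buf, size) ls) = out ++ pvGlue2 m buf size ls := by
  have hmp : ((m.toNat - 1 : Nat) : Int) + 1 = m := by omega
  have hfold : ∀ (ln : String) (outq : List (List String)),
      (PySem.List.pyRange 0 (PySem.Str.len ln) m).foldl
          (fun o s => o ++ [[PySem.Str.slice ln (some s) (some (s + m))]]) outq
        = outq ++ pvHardCutB (m.toNat - 1) ln.toList := by
    intro ln outq
    have h := pvHardCut_fold ln (m.toNat - 1) ln.toList.length 0 outq (by omega)
    rw [hmp] at h
    simpa using h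
  intro ls
  induction ls with
  | nil =>
    intro out buf size hs
    by_cases hb : buf = [] <;>
      simp [pvSplitParLoopA, pvFin2, pvGlue2, hb, pvChunksB_nil, pvTakeFitB]
  | cons ln rest ih =>
    intro out buf size hs
    have hl := pvStrLen_nonneg ln
    rw [pvSplitParLoopA]
    by_cases h1 : PySem.Str.len ln + 1 > m
    · simp only [if_pos h1]
      rw [hfold, ih _ _ _ (by simp [pvCostB])]
      by_cases hb : buf = []
      · subst hb
        simp [pvGlue2, pvChunksB_cons_long m ln rest h1]
      · simp [pvGlue2, hb, pvTakeFitB_cons_neg m size ln rest (by omega),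
          pvChunksB_cons_long m ln rest h1]
    · simp only [if_neg h1]
      by_cases h2 : size + (PySem.Str.len ln + 1) > m ∧ buf ≠ []
      · simp only [if_pos h2]
        rw [ih _ _ _ (by simp [pvCostB])]
        simp [pvGlue2, h2.2, pvTakeFitB_cons_neg m size ln rest (by omega),
          pvChunksB_cons_fit m ln rest h1, pvTakeFitB_cons_pos m 0 ln rest ⟨by omega, by omega⟩]
      · simp only [if_neg h2]
        rw [ih _ _ _ (by simp [pvCostB_append, pvCostB_cons, pvCostB, hs])]
        by_cases hb : buf = []
        · subst hb
          have hsz : size = 0 := by simpa [pvCostB] using hs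
          subst hsz
          simp [pvGlue2, pvChunksB_cons_fit m ln rest h1,
            pvTakeFitB_cons_pos m 0 ln rest ⟨by omega, by omega⟩]
        · have hle : size + (PySem.Str.len ln + 1) ≤ m := by
            rcases not_and_or.mp h2 with h | h
            · omega
            · exact absurd hb (by simpa using h)
          simp [pvGlue2, hb, pvTakeFitB_cons_pos m size ln rest ⟨by omega, by omega⟩]

theorem pvSplitParA_eq (m : Int) (hm : 0 < m) (par : List String) :
    pvSplitParA m par = pvChunksB m par := by
  have h := pvSplitParLoopA_eq m hm par [] [] 0 (by simp [pvCostB])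
  simpa [pvSplitParA, pvFin2, pvGlue2] using h

-- ---- expanded (A side) = flat chunk list ----
theorem pvExpandedA_eq (m : Int) (hm : 0 < m) (ps : List (List String))
    (hne : ∀ p ∈ ps, p ≠ []) : pvExpandedA m ps = ps.flatMap (pvChunksB m) := by
  unfold pvExpandedA
  have hfun : (fun (expanded : List (List String)) par =>
        if pvSumLenA par > m then expanded ++ pvSplitParA m par else expanded ++ [par])
      = fun (expanded : List (List String)) par =>
        expanded ++ (if pvSumLenA par > m then pvSplitParA m par else [par]) := by
    funext e p; split <;> rfl
  rw [hfun, PySem.List.foldl_append_eq_flatMap, List.nil_append]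
  induction ps with
  | nil => simp
  | cons p ps ih =>
    rw [List.flatMap_cons, List.flatMap_cons, ih (fun q hq => hne q (List.mem_cons_of_mem _ hq))]
    congr 1
    by_cases hgt : pvSumLenA p > m
    · rw [if_pos hgt, pvSplitParA_eq m hm]
    · rw [if_neg hgt]
      rw [pvChunksB_of_fits m p (hne p List.mem_cons_self) (by rw [← pvSumLenA_eq_costB]; omega)]


-- ---- B's emit-fold equals A's pack loop ----
theorem pvStrLen_empty : PySem.Str.len "" = 0 := rfl

theorem pvPackFoldB_cons (m : Int) (st : List (List String) × List String × Int) (c : List String) (C : List (List String)) :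
    pvPackFoldB m st (c :: C) = pvPackFoldB m (pvEmitB m c (pvCostB c) st) C := rfl

theorem pvPackFoldB_append (m : Int) (st : List (List String) × List String × Int) (C D : List (List String)) :
    pvPackFoldB m st (C ++ D) = pvPackFoldB m (pvPackFoldB m st C) D := by
  simp [pvPackFoldB]

theorem pvPackLoopA_cons_empty (m : Int) (subs : List (List String)) (size : Int) (c : List String) (C : List (List String)) :
    pvPackLoopA m (subs, [], size) (c :: C) = pvPackLoopA m (subs, c, size + pvSumLenA c) C := by
  rw [pvPackLoopA]
  simp

theorem pvPackLoopA_cons_flush (m : Int) (subs : List (List String)) (buf : List String) (size : Int) (c : List String) (C : List (List String)) (hb : buf ≠ []) (hgt : size + 1 + pvSumLenA c > m) :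
    pvPackLoopA m (subs, buf, size) (c :: C) = pvPackLoopA m (subs ++ [buf], c, 0 + pvSumLenA c) C := by
  rw [pvPackLoopA]
  simp [hb, hgt]

theorem pvPackLoopA_cons_fit (m : Int) (subs : List (List String)) (buf : List String) (size : Int) (c : List String) (C : List (List String)) (hb : buf ≠ []) (hgt : ¬ size + 1 + pvSumLenA c > m) :
    pvPackLoopA m (subs, buf, size) (c :: C) = pvPackLoopA m (subs, (buf ++ [""]) ++ c, (size + 1) + pvSumLenA c) C := by
  rw [pvPackLoopA]
  simp [hb, hgt]

theorem pvPackFoldB_eq_loopA (m : Int) :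
    ∀ (C : List (List String)) (subs : List (List String)) (buf : List String) (size : Int),
    size = pvCostB buf →
    pvPackFoldB m (subs, buf, size) C = pvPackLoopA m (subs, buf, size) C := by
  intro C
  induction C with
  | nil => intro subs buf size _; rfl
  | cons c C ih =>
    intro subs buf size hs
    rw [pvPackFoldB_cons]
    by_cases hb : buf = []
    · subst hb
      have hsz : size = 0 := by simpa [pvCostB] using hs
      subst hsz
      rw [pvPackLoopA_cons_empty,
        show pvEmitB m c (pvCostB c) (subs, [], 0) = (subs, c, pvCostB c) by simp [pvEmitB],
        show (0 : Int) + pvSumLenA c = pvCostB c by rw [pvSumLenA_eq_costB]; ring]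
      exact ih subs c (pvCostB c) rfl
    · by_cases h2 : size + 1 + pvCostB c > m
      · rw [pvPackLoopA_cons_flush m subs buf size c C hb
          (by rw [pvSumLenA_eq_costB]; omega),
          show pvEmitB m c (pvCostB c) (subs, buf, size) = (subs ++ [buf], c, pvCostB c) by
            simp [pvEmitB, hb, h2],
          show (0 : Int) + pvSumLenA c = pvCostB c by rw [pvSumLenA_eq_costB]; ring]
        exact ih _ c (pvCostB c) rfl
      · rw [pvPackLoopA_cons_fit m subs buf size c C hb
          (by rw [pvSumLenA_eq_costB]; omega),
          show pvEmitB m c (pvCostB c) (subs, buf, size) = (subs, (buf ++ [""]) ++ c, size + 1 + pvCostB c) by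
            simp [pvEmitB, hb, h2],
          pvSumLenA_eq_costB]
        exact ih subs ((buf ++ [""]) ++ c) (size + 1 + pvCostB c)
          (by simp [pvCostB, hs, pvStrLen_empty]; ring)

-- ---- B's cut-emit equals emit-fold over the hard-cut chunks ----
theorem pvStrLen_ofList (l : List Char) : PySem.Str.len (String.ofList l) = (l.length : Int) := by
  rw [PySem.Str.len_eq]
  simp

theorem pvCutEmitB_eq (m : Int) (mp : Nat) : ∀ (cs : List Char) (st : List (List String) × List String × Int),
    pvCutEmitB m mp cs st = pvPackFoldB m st (pvHardCutB mp cs) := by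
  intro cs st
  fun_induction pvCutEmitB m mp cs st with
  | case1 st => simp [pvHardCutB, pvPackFoldB]
  | case2 c cs st ih =>
    rw [ih, pvHardCutB, pvPackFoldB_cons,
      show ((List.take (mp + 1) (c :: cs)).length : Int) + 1
          = pvCostB [String.ofList (List.take (mp + 1) (c :: cs))] by
        simp [pvCostB, pvStrLen_ofList]]

-- ---- glue equations for the chunk stream ----
theorem pvFlatChunks_blank (m : Int) {ln : String} (h : PySem.Str.strip ln = "") (rest : List String) :
    pvFlatChunks m (ln :: rest) = pvFlatChunks m rest := by
  rw [pvFlatChunks, pvParasB_blank h, pvFlatChunks]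

theorem pvFlatChunks_split (m : Int) (rest : List String) :
    pvFlatChunks m rest =
      pvChunksB m (rest.takeWhile (fun x => !pvBlankB x))
        ++ pvFlatChunks m (rest.dropWhile (fun x => !pvBlankB x)) := by
  cases rest with
  | nil => simp [pvFlatChunks, pvParasB, pvChunksB_nil]
  | cons ln tl =>
    by_cases hb : PySem.Str.strip ln = ""
    · have hbt : pvBlankB ln = true := by simp [pvBlankB, hb]
      simp [List.takeWhile_cons, List.dropWhile_cons, hbt, pvChunksB_nil]
    · have hbb : (!pvBlankB ln) = true := by simp [pvBlankB, hb]
      rw [pvFlatChunks, pvParasB_nonblank hb, List.flatMap_cons]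
      simp only [List.takeWhile_cons, List.dropWhile_cons, hbb, if_true]
      rfl

theorem pvFlatChunks_nonblank (m : Int) {ln : String} (h : ¬ PySem.Str.strip ln = "") (rest : List String) :
    pvFlatChunks m (ln :: rest) =
      pvChunksB m (ln :: rest.takeWhile (fun x => !pvBlankB x))
        ++ pvFlatChunks m (rest.dropWhile (fun x => !pvBlankB x)) := by
  rw [pvFlatChunks, pvParasB_nonblank h, List.flatMap_cons]
  rfl

theorem pvGlueS_nil (m : Int) (ls : List String) : pvGlueS m [] ls = pvFlatChunks m ls := by
  rw [pvGlueS, if_pos rfl]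

theorem pvGlueS_ne (m : Int) (cur : List String) (hc : cur ≠ []) (ls : List String) :
    pvGlueS m cur ls =
      (cur ++ (pvTakeFitB m (pvCostB cur) (ls.takeWhile (fun x => !pvBlankB x))).1)
        :: (pvChunksB m (pvTakeFitB m (pvCostB cur) (ls.takeWhile (fun x => !pvBlankB x))).2
            ++ pvFlatChunks m (ls.dropWhile (fun x => !pvBlankB x))) := by
  rw [pvGlueS, if_neg hc]

-- Source B's finalisation `if cur: emit(cur, cur_size)` folded over the stream state
def pvAltFin (m : Int) (st : (List (List String) × List String × Int) × List String × Int) : List (List String) × List String × Int :=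
  if st.2.1 ≠ [] then pvEmitB m st.2.1 st.2.2 st.1 else st.1

-- ---- B's streaming loop equals emit-fold over the flat chunk list ----
theorem pvStreamB_eq (m : Int) :
    ∀ (ls : List String) (pk : List (List String) × List String × Int) (cur : List String) (cursz : Int),
    cursz = pvCostB cur →
    pvAltFin m (pvStreamB m (pk, cur, cursz) ls) = pvPackFoldB m pk (pvGlueS m cur ls) := by
  intro ls
  induction ls with
  | nil =>
    intro pk cur cursz hs
    by_cases hc : cur = []
    · subst hc
      simp [pvStreamB, pvAltFin, pvGlueS_nil, pvFlatChunks, pvParasB, pvPackFoldB]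
    · rw [pvStreamB, pvAltFin, if_pos hc, pvGlueS_ne m cur hc]
      simp [pvTakeFitB, pvChunksB_nil, pvFlatChunks, pvParasB, pvPackFoldB_cons, pvPackFoldB, hs]
  | cons ln rest ih =>
    intro pk cur cursz hs
    have hl := pvStrLen_nonneg ln
    rw [pvStreamB]
    by_cases hb : PySem.Str.strip ln = ""
    · have hbt : (!pvBlankB ln) = false := by simp [pvBlankB, hb]
      rw [if_pos hb]
      by_cases hc : cur = []
      · subst hc
        rw [if_neg (by simp), ih pk [] cursz hs, pvGlueS_nil, pvGlueS_nil,
          pvFlatChunks_blank m hb]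
      · rw [if_pos hc, ih _ [] 0 (by simp [pvCostB]), pvGlueS_nil]
        rw [pvGlueS_ne m cur hc]
        simp only [List.takeWhile_cons, List.dropWhile_cons, hbt, if_false, Bool.false_eq_true]
        rw [pvTakeFitB, pvPackFoldB_cons]
        simp only [List.append_nil, pvChunksB_nil, List.nil_append]
        rw [← hs, pvFlatChunks_blank m hb]
    · have hbt : (!pvBlankB ln) = true := by simp [pvBlankB, hb]
      rw [if_neg hb]
      by_cases h1 : PySem.Str.len ln + 1 > m
      · rw [if_pos h1]
        by_cases hc : cur = []
        · subst hc
          have hsz : cursz = 0 := by simpa [pvCostB] using hs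
          subst hsz
          simp only [ne_eq, not_true_eq_false, if_false]
          rw [ih _ [] 0 (by simp [pvCostB]), pvCutEmitB_eq, ← pvPackFoldB_append]
          rw [pvGlueS_nil, pvGlueS_nil, pvFlatChunks_nonblank m hb,
            pvChunksB_cons_long m ln _ h1, pvFlatChunks_split m rest]
          simp
        · simp only [ne_eq, hc, not_false_eq_true, if_true]
          rw [ih _ [] 0 (by simp [pvCostB]), pvCutEmitB_eq, pvGlueS_nil]
          rw [show pvEmitB m cur cursz pk = pvPackFoldB m pk [cur] by
            rw [pvPackFoldB_cons, hs]; rfl]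
          rw [← pvPackFoldB_append, ← pvPackFoldB_append]
          rw [pvGlueS_ne m cur hc]
          simp only [List.takeWhile_cons, List.dropWhile_cons, hbt, if_true]
          rw [pvTakeFitB_cons_neg m _ ln _ (by omega)]
          rw [pvChunksB_cons_long m ln _ h1, pvFlatChunks_split m rest]
          simp
      · rw [if_neg h1]
        by_cases h2 : cur ≠ [] ∧ cursz + (PySem.Str.len ln + 1) > m
        · rw [if_pos h2]
          simp only [List.nil_append]
          rw [ih _ [ln] (0 + (PySem.Str.len ln + 1)) (by simp [pvCostB])]
          rw [show pvEmitB m cur cursz pk = pvPackFoldB m pk [cur] by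
            rw [pvPackFoldB_cons, hs]; rfl]
          rw [← pvPackFoldB_append]
          rw [pvGlueS_ne m cur h2.1]
          simp only [List.takeWhile_cons, List.dropWhile_cons, hbt, if_true]
          rw [pvTakeFitB_cons_neg m _ ln _ (by rw [← hs]; omega)]
          have hfit : PySem.Str.len ln + 1 ≤ m ∧ (0 : Int) + (PySem.Str.len ln + 1) ≤ m := by
            constructor <;> omega
          rw [pvChunksB_cons_fit m ln _ h1, pvTakeFitB_cons_pos m 0 ln _ hfit]
          rw [pvGlueS_ne m [ln] (by simp)]
          simp [pvCostB]
        · rw [if_neg h2]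
          rw [ih pk (cur ++ [ln]) (cursz + (PySem.Str.len ln + 1))
            (by simp [pvCostB, hs]; try ring)]
          congr 1
          by_cases hc : cur = []
          · subst hc
            have hsz : cursz = 0 := by simpa [pvCostB] using hs
            subst hsz
            have hfit : PySem.Str.len ln + 1 ≤ m ∧ (0 : Int) + (PySem.Str.len ln + 1) ≤ m := by
              constructor <;> omega
            rw [pvGlueS_nil, pvFlatChunks_nonblank m hb,
              pvChunksB_cons_fit m ln _ h1, pvTakeFitB_cons_pos m 0 ln _ hfit]
            rw [pvGlueS_ne m _ (by simp)]
            simp [pvCostB]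
          · have hle : cursz + (PySem.Str.len ln + 1) ≤ m := by
              rcases not_and_or.mp h2 with h | h
              · exact absurd hc (by simpa using h)
              · omega
            rw [pvGlueS_ne m cur hc]
            simp only [List.takeWhile_cons, List.dropWhile_cons, hbt, if_true]
            have hpos : PySem.Str.len ln + 1 ≤ m ∧ pvCostB cur + (PySem.Str.len ln + 1) ≤ m := by
              constructor
              · omega
              · rw [← hs]; omega
            rw [pvTakeFitB_cons_pos m _ ln _ hpos]
            rw [pvGlueS_ne m _ (by simp [hc])]
            rw [show pvCostB (cur ++ [ln]) = pvCostB cur + (PySem.Str.len ln + 1) by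
              simp [pvCostB]; try ring]
            rw [← hs]
            simp

-- ===== VERDICT (by name: the statement is the Claim_ definition above) =====
theorem split_text_segment_py_spec : Claim_equal_split_text_segment_py := by
  intro seg_lines max_chars _
  unfold Spec_split_text_segment_py split_text_segment_py split_text_segment_py_alt
  by_cases hm : max_chars ≤ 0
  · simp [hm]
  · have hm' : 0 < max_chars := by omega
    simp only [if_neg hm]
    have hA : pvPackLoopA max_chars ([], [], 0) (pvExpandedA max_chars (pvParasA seg_lines))
        = pvPackFoldB max_chars ([], [], 0) (pvFlatChunks max_chars seg_lines) := by
      rw [pvParasA_eq, pvExpandedA_eq max_chars hm' _ (pvParasB_ne_nil seg_lines)]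
      rw [pvPackFoldB_eq_loopA max_chars _ [] [] 0 (by simp [pvCostB])]
      rfl
    have hB : pvAltFin max_chars (pvStreamB max_chars (([], [], 0), [], 0) seg_lines)
        = pvPackFoldB max_chars ([], [], 0) (pvFlatChunks max_chars seg_lines) := by
      rw [pvStreamB_eq max_chars seg_lines ([], [], 0) [] 0 (by simp [pvCostB]), pvGlueS_nil]
    show pvFin2 (pvPackLoopA max_chars ([], [], 0) (pvExpandedA max_chars (pvParasA seg_lines)))
        = pvFin2 (pvAltFin max_chars (pvStreamB max_chars (([], [], 0), [], 0) seg_lines))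
    rw [hA, hB]
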